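-- pv_equiv track=rewrite | github.com/JamesPetrie/zkllm-entropy | docs/analysis/zk_matmul_toy.py | mle_eval
-- ===== SOURCE A (Python) =====
-- P = 257
--
-- def fadd(a, b): return (a + b) % P
--
-- def fsub(a, b): return (a - b) % P
--
-- def fmul(a, b): return (a * b) % P
--
-- def mle_eval(data, point):
--     """Evaluate MLE of data at point using iterated folding. Cost: O(2^k) muls."""
--     d = list(data)
--     for j in range(len(point)):
--         r = point[j]
--         one_minus_r = fsub(1, r)
--         half = len(d) // 2
--         d = [fadd(fmul(one_minus_r, d[2*i]), fmul(r, d[2*i+1])) for i in range(half)]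
--     assert len(d) == 1
--     return d[0]
-- ===== SOURCE B (Python) =====
-- P = 257
--
-- def fadd(a, b): return (a + b) % P
--
-- def fsub(a, b): return (a - b) % P
--
-- def fmul(a, b): return (a * b) % P
--
-- def mle_eval(data, point):
--     """Evaluate MLE of data at point by the direct Lagrange weight sum. Cost: O(k*2^k) muls."""
--     d = list(data)
--     k = len(point)
--     assert (len(d) >> k) == 1
--     result = 0
--     for x in range(2 ** k):
--         w = 1
--         xb = x
--         for pj in point:
--             w = fmul(w, pj if xb & 1 else fsub(1, pj))
--             xb >>= 1
--         result = fadd(result, fmul(w, d[x]))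
--     return result
-- ===== Notes on version B (the rewrite author's own statement) =====
-- stated objective: alternative
-- what changed: Replaces A's iterated pairwise folding (k passes that halve the table) with the direct Lagrange weight-sum definition of the MLE: one pass over the 2^k hypercube points, building each weight from the bits of the index.
-- intended difference: For an empty point with a single data entry outside [0,257), A returns the raw entry unreduced (it never touches it), while B returns its canonical residue mod 257; B's is the intended value since the function computes in GF(257). — e.g. on mle_eval([300], []): A returns 300, B returns 43
import Mathlib
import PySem

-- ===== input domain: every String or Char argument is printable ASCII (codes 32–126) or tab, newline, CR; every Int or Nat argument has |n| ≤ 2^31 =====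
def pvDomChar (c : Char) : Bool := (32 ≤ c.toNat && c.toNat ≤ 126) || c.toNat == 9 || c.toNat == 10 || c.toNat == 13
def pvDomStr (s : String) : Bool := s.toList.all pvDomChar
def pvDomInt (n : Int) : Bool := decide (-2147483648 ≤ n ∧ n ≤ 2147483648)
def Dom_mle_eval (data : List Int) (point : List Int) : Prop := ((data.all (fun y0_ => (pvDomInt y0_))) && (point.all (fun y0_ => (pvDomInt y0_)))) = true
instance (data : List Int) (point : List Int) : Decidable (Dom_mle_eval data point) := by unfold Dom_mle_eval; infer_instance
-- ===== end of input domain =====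

-- B replaces A's iterated pairwise folding with the direct Lagrange weight-sum
-- definition of the multilinear extension (alternative algorithm, similar cost).


-- ===== PORT A =====
def pfadd (a b : Int) : Int := PySem.Int.mod (a + b) 257
def pfsub (a b : Int) : Int := PySem.Int.mod (a - b) 257
def pfmul (a b : Int) : Int := PySem.Int.mod (a * b) 257

-- one body of A's for-loop: the halving list comprehension (indices 2*i, 2*i+1 are in range for i < len/2)
def foldStepA (r : Int) (d : List Int) : List Int :=
  (List.range (d.length / 2)).map (fun i =>
    pfadd (pfmul (pfsub 1 r) (d.getD (2 * i) 0)) (pfmul r (d.getD (2 * i + 1) 0)))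

def mle_eval (data : List Int) (point : List Int) : Int :=
  (point.foldl (fun d r => foldStepA r d) data).getD 0 0

-- ===== PORT B =====
-- B's inner loop: w, xb accumulator over the point list
def weightB (point : List Int) (x : Nat) : Int :=
  (point.foldl (fun (s : Int × Nat) pj =>
    (pfmul s.1 (if s.2 &&& 1 == 1 then pj else pfsub 1 pj), s.2 >>> 1)) (1, x)).1

def mle_eval_alt (data : List Int) (point : List Int) : Int :=
  (List.range (2 ^ point.length)).foldl
    (fun result x => pfadd result (pfmul (weightB point x) (data.getD x 0))) 0

-- ===== PRECONDITION & SPEC =====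
-- A (and B) raise AssertionError unless floor-halving len(data) len(point) times yields 1,
-- i.e. unless len(data) >> len(point) == 1; Pre_ admits exactly the non-raising inputs.
def Pre_mle_eval (data : List Int) (point : List Int) : Prop :=
  data.length >>> point.length = 1
instance (data : List Int) (point : List Int) : Decidable (Pre_mle_eval data point) := by
  unfold Pre_mle_eval; infer_instance
def pvWitness_mle_eval : List Int × List Int := ([3, 5], [7])

-- For an empty point with a single data entry outside [0,257), A returns the raw entry
-- unreduced (it never touches it), while B returns its canonical residue mod 257;
-- B's is the intended value since the function computes in GF(257).
def D_mle_eval (data : List Int) (point : List Int) : Prop :=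
  point = [] ∧ ¬ (0 ≤ data.getD 0 0 ∧ data.getD 0 0 < 257)
instance (data : List Int) (point : List Int) : Decidable (D_mle_eval data point) := by
  unfold D_mle_eval; infer_instance

def Spec_mle_eval (data : List Int) (point : List Int) (out : Int) : Prop :=
  ¬ D_mle_eval data point → out = mle_eval_alt data point
instance (data : List Int) (point : List Int) (out : Int) : Decidable (Spec_mle_eval data point out) := by
  unfold Spec_mle_eval; infer_instance

def pvDiffWitness_mle_eval : List Int × List Int := ([300], [])
def pvDiffWitnessOut_mle_eval : Int × Int := (300, 43)

-- ===== CLAIM (what is proved, stated in full; the proofs are below) =====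
def Claim_unchanged_mle_eval : Prop := ∀ (data : List Int) (point : List Int), Dom_mle_eval data point → Pre_mle_eval data point → Spec_mle_eval data point (mle_eval data point)
def Claim_changed_mle_eval : Prop := Dom_mle_eval (pvDiffWitness_mle_eval.1) (pvDiffWitness_mle_eval.2) ∧ Pre_mle_eval (pvDiffWitness_mle_eval.1) (pvDiffWitness_mle_eval.2) ∧ D_mle_eval (pvDiffWitness_mle_eval.1) (pvDiffWitness_mle_eval.2) ∧ mle_eval (pvDiffWitness_mle_eval.1) (pvDiffWitness_mle_eval.2) = pvDiffWitnessOut_mle_eval.1 ∧ mle_eval_alt (pvDiffWitness_mle_eval.1) (pvDiffWitness_mle_eval.2) = pvDiffWitnessOut_mle_eval.2 ∧ pvDiffWitnessOut_mle_eval.1 ≠ pvDiffWitnessOut_mle_eval.2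
def Claim_exact_mle_eval : Prop := ∀ (data : List Int) (point : List Int), Dom_mle_eval data point → Pre_mle_eval data point → D_mle_eval data point → mle_eval data point ≠ mle_eval_alt data point

-- ===== LEMMAS AND PROOFS =====

-- exact (integer) multilinear weight and weighted sum, the common specification
def wEx : List Int → Nat → Int
  | [], _ => 1
  | r :: ps, x => (if x % 2 = 1 then r else 1 - r) * wEx ps (x / 2)

def sEx (point d : List Int) : Int :=
  ((List.range (2 ^ point.length)).map (fun x => wEx point x * d.getD x 0)).sum

theorem pmod_eq (a : Int) : PySem.Int.mod a 257 = a % 257 :=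
  PySem.Int.mod_eq_emod_of_pos (by norm_num)

theorem pfadd_modeq (a b : Int) : pfadd a b ≡ a + b [ZMOD 257] := by
  unfold pfadd; rw [pmod_eq]; exact Int.emod_emod_of_dvd _ dvd_rfl

theorem pfsub_modeq (a b : Int) : pfsub a b ≡ a - b [ZMOD 257] := by
  unfold pfsub; rw [pmod_eq]; exact Int.emod_emod_of_dvd _ dvd_rfl

theorem pfmul_modeq (a b : Int) : pfmul a b ≡ a * b [ZMOD 257] := by
  unfold pfmul; rw [pmod_eq]; exact Int.emod_emod_of_dvd _ dvd_rfl

theorem pfadd_reduced (a b : Int) : 0 ≤ pfadd a b ∧ pfadd a b < 257 := by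
  unfold pfadd; rw [pmod_eq]
  exact ⟨Int.emod_nonneg _ (by norm_num), Int.emod_lt_of_pos _ (by norm_num)⟩

theorem sum_modeq (l : List Nat) (f g : Nat → Int)
    (h : ∀ x ∈ l, f x ≡ g x [ZMOD 257]) :
    (l.map f).sum ≡ (l.map g).sum [ZMOD 257] := by
  induction l with
  | nil => rfl
  | cons a t ih =>
      simp only [List.map_cons, List.sum_cons]
      exact (h a (by simp)).add (ih (fun x hx => h x (by simp [hx])))

theorem sum_range_double (n : Nat) (f : Nat → Int) :
    ((List.range (2 * n)).map f).sum
      = ((List.range n).map (fun y => f (2 * y) + f (2 * y + 1))).sum := by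
  induction n with
  | zero => simp
  | succ m ih =>
      have h : 2 * (m + 1) = (2 * m + 1) + 1 := by ring
      rw [h, List.range_succ, List.range_succ, List.range_succ]
      simp [ih]

theorem wEx_even (r : Int) (ps : List Int) (y : Nat) :
    wEx (r :: ps) (2 * y) = (1 - r) * wEx ps y := by
  have h1 : (2 * y) % 2 = 0 := by omega
  have h2 : (2 * y) / 2 = y := by omega
  simp [wEx, h1, h2]

theorem wEx_odd (r : Int) (ps : List Int) (y : Nat) :
    wEx (r :: ps) (2 * y + 1) = r * wEx ps y := by
  have h1 : (2 * y + 1) % 2 = 1 := by omega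
  have h2 : (2 * y + 1) / 2 = y := by omega
  simp [wEx, h1, h2]

theorem sEx_cons (r : Int) (ps d : List Int) :
    sEx (r :: ps) d
      = ((List.range (2 ^ ps.length)).map
          (fun y => wEx ps y * ((1 - r) * d.getD (2 * y) 0 + r * d.getD (2 * y + 1) 0))).sum := by
  unfold sEx
  have hp : 2 ^ (r :: ps).length = 2 * 2 ^ ps.length := by
    simp [List.length_cons, pow_succ]; ring
  rw [hp, sum_range_double]
  refine congrArg List.sum (List.map_congr_left ?_)
  intro y _
  rw [wEx_even, wEx_odd]; ring

theorem foldStepA_length (r : Int) (d : List Int) :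
    (foldStepA r d).length = d.length / 2 := by
  simp [foldStepA]

theorem foldStepA_getD (r : Int) (d : List Int) (y : Nat) (hy : y < d.length / 2) :
    (foldStepA r d).getD y 0
      = pfadd (pfmul (pfsub 1 r) (d.getD (2 * y) 0)) (pfmul r (d.getD (2 * y + 1) 0)) := by
  unfold foldStepA
  rw [List.getD_eq_getElem?_getD]
  simp [hy]

theorem foldStepA_mem_reduced (r : Int) (d : List Int) :
    ∀ a ∈ foldStepA r d, 0 ≤ a ∧ a < 257 := by
  intro a ha
  unfold foldStepA at ha
  simp only [List.mem_map] at ha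
  obtain ⟨i, _, rfl⟩ := ha
  exact pfadd_reduced _ _

theorem getD_mem (d : List Int) (h : d ≠ []) : d.getD 0 0 ∈ d := by
  cases d with
  | nil => exact absurd rfl h
  | cons a t => simp

theorem foldA_reduced (ps : List Int) : ∀ (d : List Int),
    2 ^ ps.length ≤ d.length → (∀ a ∈ d, 0 ≤ a ∧ a < 257) →
    0 ≤ (ps.foldl (fun d r => foldStepA r d) d).getD 0 0 ∧
      (ps.foldl (fun d r => foldStepA r d) d).getD 0 0 < 257 := by
  induction ps with
  | nil =>
      intro d hlen hred
      simp only [List.foldl_nil]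
      exact hred _ (getD_mem d (by intro h; subst h; simp at hlen))
  | cons r t ih =>
      intro d hlen hred
      simp only [List.foldl_cons]
      refine ih (foldStepA r d) ?_ (foldStepA_mem_reduced r d)
      rw [foldStepA_length]
      have : 2 ^ t.length * 2 ≤ d.length := by
        simpa [List.length_cons, pow_succ] using hlen
      omega

theorem foldA_modeq (ps : List Int) : ∀ (d : List Int),
    2 ^ ps.length ≤ d.length →
    (ps.foldl (fun d r => foldStepA r d) d).getD 0 0 ≡ sEx ps d [ZMOD 257] := by
  induction ps with
  | nil =>
      intro d _
      simp [sEx, wEx]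
  | cons r t ih =>
      intro d hlen
      have hhalf : 2 ^ t.length ≤ d.length / 2 := by
        have : 2 ^ t.length * 2 ≤ d.length := by
          simpa [List.length_cons, pow_succ] using hlen
        omega
      simp only [List.foldl_cons]
      have h1 := ih (foldStepA r d) (by rw [foldStepA_length]; exact hhalf)
      refine h1.trans ?_
      rw [sEx_cons]
      unfold sEx
      refine sum_modeq _ _ _ ?_
      intro y hy
      have hylt : y < d.length / 2 := lt_of_lt_of_le (List.mem_range.mp hy) hhalf
      rw [foldStepA_getD r d y hylt]
      refine Int.ModEq.mul_left _ ?_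
      calc pfadd (pfmul (pfsub 1 r) (d.getD (2 * y) 0)) (pfmul r (d.getD (2 * y + 1) 0))
          ≡ pfmul (pfsub 1 r) (d.getD (2 * y) 0) + pfmul r (d.getD (2 * y + 1) 0) [ZMOD 257] :=
            pfadd_modeq _ _
        _ ≡ pfsub 1 r * d.getD (2 * y) 0 + r * d.getD (2 * y + 1) 0 [ZMOD 257] :=
            ((pfmul_modeq _ _).add (pfmul_modeq _ _))
        _ ≡ (1 - r) * d.getD (2 * y) 0 + r * d.getD (2 * y + 1) 0 [ZMOD 257] :=
            (((pfsub_modeq 1 r).mul_right _).add (Int.ModEq.refl _))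

theorem weightB_modeq_gen (ps : List Int) : ∀ (x : Nat) (w : Int),
    (ps.foldl (fun (s : Int × Nat) pj =>
      (pfmul s.1 (if s.2 &&& 1 == 1 then pj else pfsub 1 pj), s.2 >>> 1)) (w, x)).1
      ≡ w * wEx ps x [ZMOD 257] := by
  induction ps with
  | nil => intro x w; simp [wEx]
  | cons r t ih =>
      intro x w
      simp only [List.foldl_cons]
      have hand : (x &&& 1 == 1) = decide (x % 2 = 1) := by
        rw [Nat.and_one_is_mod]
        cases h : decide (x % 2 = 1) <;> simp_all
      have hshift : x >>> 1 = x / 2 := Nat.shiftRight_one x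
      rw [hand, hshift]
      refine (ih (x / 2) _).trans ?_
      have hmul : pfmul w (if decide (x % 2 = 1) = true then r else pfsub 1 r)
          ≡ w * (if x % 2 = 1 then r else 1 - r) [ZMOD 257] := by
        by_cases h : x % 2 = 1 <;> simp only [h, decide_true, decide_false, if_true, if_false] <;>
          first
          | exact pfmul_modeq _ _
          | exact (pfmul_modeq _ _).trans ((pfsub_modeq 1 r).mul_left w)
      calc pfmul w (if decide (x % 2 = 1) = true then r else pfsub 1 r) * wEx t (x / 2)
          ≡ w * (if x % 2 = 1 then r else 1 - r) * wEx t (x / 2) [ZMOD 257] := hmul.mul_right _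
        _ = w * wEx (r :: t) x := by rw [wEx]; ring

theorem weightB_modeq (point : List Int) (x : Nat) :
    weightB point x ≡ wEx point x [ZMOD 257] := by
  have := weightB_modeq_gen point x 1
  simpa [weightB] using this

theorem fold_pfadd_modeq (f : Nat → Int) (n : Nat) : ∀ (res : Int),
    (List.range n).foldl (fun result x => pfadd result (f x)) res
      ≡ res + ((List.range n).map f).sum [ZMOD 257] := by
  induction n with
  | zero => intro res; simp
  | succ m ih =>
      intro res
      rw [List.range_succ, List.foldl_append, List.map_append]
      simp only [List.foldl_cons, List.foldl_nil, List.map_cons, List.map_nil,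
        List.sum_append, List.sum_cons, List.sum_nil]
      refine (pfadd_modeq _ _).trans ?_
      refine ((ih res).add_right (f m)).trans ?_
      have h2 : res + ((List.map f (List.range m)).sum + (f m + 0))
          = res + (List.map f (List.range m)).sum + f m := by ring
      rw [h2]

theorem fold_pfadd_reduced (f : Nat → Int) (n : Nat) (hn : 0 < n) (res : Int) :
    0 ≤ (List.range n).foldl (fun result x => pfadd result (f x)) res ∧
      (List.range n).foldl (fun result x => pfadd result (f x)) res < 257 := by
  obtain ⟨m, rfl⟩ : ∃ m, n = m + 1 := ⟨n - 1, by omega⟩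
  rw [List.range_succ, List.foldl_append]
  simp only [List.foldl_cons, List.foldl_nil]
  exact pfadd_reduced _ _

theorem mle_eval_alt_eq (data point : List Int) :
    mle_eval_alt data point = sEx point data % 257 := by
  have hmod : mle_eval_alt data point ≡ sEx point data [ZMOD 257] := by
    unfold mle_eval_alt
    refine (fold_pfadd_modeq _ _ 0).trans ?_
    have hsum : ((List.range (2 ^ point.length)).map
        (fun x => pfmul (weightB point x) (data.getD x 0))).sum ≡ sEx point data [ZMOD 257] := by
      unfold sEx
      refine sum_modeq _ _ _ ?_
      intro x _
      exact (pfmul_modeq _ _).trans ((weightB_modeq point x).mul_right _)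
    simpa using hsum
  have hred := fold_pfadd_reduced (fun x => pfmul (weightB point x) (data.getD x 0))
      (2 ^ point.length) (Nat.two_pow_pos _) 0
  have hredA : 0 ≤ mle_eval_alt data point ∧ mle_eval_alt data point < 257 := by
    unfold mle_eval_alt; exact hred
  have h : mle_eval_alt data point % 257 = sEx point data % 257 := hmod
  rw [Int.emod_eq_of_lt hredA.1 hredA.2] at h
  exact h

theorem pre_pow_le (data point : List Int) (hpre : Pre_mle_eval data point) :
    2 ^ point.length ≤ data.length := by
  have h1 : data.length / 2 ^ point.length = 1 := by
    unfold Pre_mle_eval at hpre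
    simpa [Nat.shiftRight_eq_div_pow] using hpre
  exact (Nat.one_le_div_iff (Nat.two_pow_pos _)).mp (le_of_eq h1.symm)

theorem mle_eval_reduced (data point : List Int) (hpre : Pre_mle_eval data point)
    (hnd : ¬ D_mle_eval data point) :
    0 ≤ mle_eval data point ∧ mle_eval data point < 257 := by
  have hpow := pre_pow_le data point hpre
  cases point with
  | nil =>
      simp only [D_mle_eval, not_and] at hnd
      simpa [mle_eval] using hnd trivial
  | cons r t =>
      have hhalf : 2 ^ t.length ≤ data.length / 2 := by
        have : 2 ^ t.length * 2 ≤ data.length := by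
          simpa [List.length_cons, pow_succ] using hpow
        omega
      simp only [mle_eval, List.foldl_cons]
      exact foldA_reduced t (foldStepA r data)
        (by rw [foldStepA_length]; exact hhalf) (foldStepA_mem_reduced r data)

-- ===== VERDICT (by name: the statement is the Claim_ definition above) =====
theorem mle_eval_spec : Claim_unchanged_mle_eval := by
  intro data point _ hpre
  unfold Spec_mle_eval
  intro hnd
  have hred := mle_eval_reduced data point hpre hnd
  have hA : mle_eval data point % 257 = sEx point data % 257 :=
    foldA_modeq point data (pre_pow_le data point hpre)
  calc mle_eval data point
      = mle_eval data point % 257 := (Int.emod_eq_of_lt hred.1 hred.2).symm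
    _ = sEx point data % 257 := hA
    _ = mle_eval_alt data point := (mle_eval_alt_eq data point).symm
theorem mle_eval_changed : Claim_changed_mle_eval := by unfold Claim_changed_mle_eval; decide
theorem mle_eval_tight : Claim_exact_mle_eval := by
  intro data point _ hpre hD
  obtain ⟨hp, hv⟩ := hD
  subst hp
  have hA : mle_eval data [] = data.getD 0 0 := by simp [mle_eval]
  have hB : mle_eval_alt data [] = data.getD 0 0 % 257 := by
    rw [mle_eval_alt_eq]
    simp [sEx, wEx]
  rw [hA, hB]
  have h1 := Int.emod_nonneg (data.getD 0 0) (show (257:Int) ≠ 0 by norm_num)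
  have h2 := Int.emod_lt_of_pos (data.getD 0 0) (show (0:Int) < 257 by norm_num)
  intro heq
  exact hv ⟨heq ▸ h1, heq ▸ h2⟩
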